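-- pv_equiv track=rewrite | github.com/PygmalionAI/data-toolbox | toolbox/filters/tomato_filter.py | _has_stuttering
-- ===== SOURCE A (Python) =====
-- def _has_stuttering(utterance: str) -> bool:
--     '''Tries to detect stuttering like "W-what?"'''
--     for word in utterance.split():
--         if "-" not in word:
--             continue
--
--         if len(word) < 4:
--             continue
--
--         if word[1] != "-":
--             continue
--
--         lowercased_word = word.lower()
--         if lowercased_word[0] == lowercased_word[2]:
--             return True
--
--     return False
-- ===== SOURCE B (Python) =====
-- def _has_stuttering(utterance: str) -> bool:
--     '''Tries to detect stuttering like "W-what?" or "I-I".'''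
--     for i in range(len(utterance) - 2):
--         if (
--             utterance[i + 1] == "-"
--             and (i == 0 or utterance[i - 1].isspace())
--             and not utterance[i].isspace()
--             and utterance[i].lower() == utterance[i + 2].lower()
--         ):
--             return True
--     return False
-- ===== Notes on version B (the rewrite author's own statement) =====
-- stated objective: alternative
-- what changed: Replaced the split()-into-words loop and guard cascade by a single character-index scan testing each word-start position for a hyphenated case-insensitive repeat of its first letter; B also detects a bare three-character stutter like 'I-I' which A's len(word)<4 cutoff misses.
-- intended difference: On utterances whose only stutter-shaped words have exactly three characters (e.g. 'I-I'), A returns False because of its len(word)<4 cutoff while B returns True; 'I-I' is a genuine stutter, so B's value is the intended one. — e.g. on _has_stuttering("I-I"): A returns false, B returns true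
import Mathlib
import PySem

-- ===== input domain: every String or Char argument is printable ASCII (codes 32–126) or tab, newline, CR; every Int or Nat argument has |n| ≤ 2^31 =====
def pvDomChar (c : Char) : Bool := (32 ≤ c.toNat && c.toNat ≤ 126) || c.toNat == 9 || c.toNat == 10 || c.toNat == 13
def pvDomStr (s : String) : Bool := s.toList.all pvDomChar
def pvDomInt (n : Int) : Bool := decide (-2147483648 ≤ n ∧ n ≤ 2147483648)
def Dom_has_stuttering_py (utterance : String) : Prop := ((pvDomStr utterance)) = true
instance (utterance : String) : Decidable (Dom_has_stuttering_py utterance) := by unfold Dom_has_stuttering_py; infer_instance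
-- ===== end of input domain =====

-- B replaces A's split()-into-words loop and guard cascade by a single character-index scan over
-- word-start positions (alternative decomposition, same O(n) cost); B also counts a bare
-- three-character stutter like "I-I", which A's length-4 cutoff misses (stated as D_ below).


-- ===== PORT A =====
-- the 'for word in utterance.split(): …' loop with early return; guards in A's order
def has_stuttering_loop : List (List Char) → Bool
  | [] => false
  | word :: rest =>
    if !word.contains '-' then has_stuttering_loop rest
    else if word.length < 4 then has_stuttering_loop rest
    else if PySem.List.pyGet? word 1 ≠ some '-' then has_stuttering_loop rest
    else
      let lowercased_word := PySem.Chars.lower word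
      if PySem.List.pyGet? lowercased_word 0 = PySem.List.pyGet? lowercased_word 2 then true
      else has_stuttering_loop rest

def has_stuttering_py (utterance : String) : Bool :=
  has_stuttering_loop (PySem.Chars.split₀ utterance.toList)

-- ===== PORT B =====
-- 'for i in range(len(utterance) - 2): if … : return True' — every index accessed lies in
-- range, so List.getD's default ' ' is never used (exact); conditions in B's order
def has_stuttering_py_alt (utterance : String) : Bool :=
  let s := utterance.toList
  (List.range (s.length - 2)).any (fun i =>
    (s.getD (i + 1) ' ' == '-')
    && (i == 0 || PySem.Chars.isspace (s.getD (i - 1) ' '))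
    && !PySem.Chars.isspace (s.getD i ' ')
    && (PySem.Chars.lowerChar (s.getD i ' ') == PySem.Chars.lowerChar (s.getD (i + 2) ' ')))

-- ===== PRECONDITION & SPEC =====
-- a word shaped like a stutter: first char, '-', the same letter again (case-insensitive)
def stutterWord : List Char → Bool
  | a :: '-' :: c :: _ => PySem.Chars.lowerChar a == PySem.Chars.lowerChar c
  | _ => false

-- On utterances whose only stutter-shaped words have exactly three characters (e.g. "I-I"),
-- A returns false because of its len(word) < 4 cutoff while B returns true; "I-I" is a
-- genuine stutter, so B's value is the intended one.
def D_has_stuttering_py (utterance : String) : Prop :=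
  (PySem.Chars.split₀ utterance.toList).any
      (fun w => stutterWord w && w.length == 3) = true ∧
  (PySem.Chars.split₀ utterance.toList).any
      (fun w => stutterWord w && decide (4 ≤ w.length)) = false
instance (utterance : String) : Decidable (D_has_stuttering_py utterance) := by
  unfold D_has_stuttering_py; infer_instance

def Spec_has_stuttering_py (utterance : String) (out : Bool) : Prop :=
  ¬ D_has_stuttering_py utterance → out = has_stuttering_py_alt utterance
instance (utterance : String) (out : Bool) : Decidable (Spec_has_stuttering_py utterance out) := by
  unfold Spec_has_stuttering_py; infer_instance

def pvDiffWitness_has_stuttering_py : String := "I-I"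
def pvDiffWitnessOut_has_stuttering_py : Bool × Bool := (false, true)

-- ===== CLAIM (what is proved, stated in full; the proofs are below) =====
def Claim_unchanged_has_stuttering_py : Prop := ∀ (utterance : String), Dom_has_stuttering_py utterance → Spec_has_stuttering_py utterance (has_stuttering_py utterance)
def Claim_changed_has_stuttering_py : Prop := Dom_has_stuttering_py (pvDiffWitness_has_stuttering_py) ∧ D_has_stuttering_py (pvDiffWitness_has_stuttering_py) ∧ has_stuttering_py (pvDiffWitness_has_stuttering_py) = pvDiffWitnessOut_has_stuttering_py.1 ∧ has_stuttering_py_alt (pvDiffWitness_has_stuttering_py) = pvDiffWitnessOut_has_stuttering_py.2 ∧ pvDiffWitnessOut_has_stuttering_py.1 ≠ pvDiffWitnessOut_has_stuttering_py.2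
def Claim_exact_has_stuttering_py : Prop := ∀ (utterance : String), Dom_has_stuttering_py utterance → D_has_stuttering_py utterance → has_stuttering_py utterance ≠ has_stuttering_py_alt utterance

-- ===== LEMMAS AND PROOFS =====

-- lowering a character never changes whether it is whitespace
theorem isspace_lowerChar (c : Char) :
    PySem.Chars.isspace (PySem.Chars.lowerChar c) = PySem.Chars.isspace c := by
  unfold PySem.Chars.lowerChar PySem.Chars.isupper
  split
  · next h =>
    simp only [Bool.and_eq_true, decide_eq_true_eq, Char.le_def] at h
    have h65 : 65 ≤ c.toNat := h.1
    have h90 : c.toNat ≤ 90 := h.2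
    have key : ∀ n : Nat, Nat.isValidChar n → (Char.ofNat n).toNat = n := by
      intro n h; simp [Char.ofNat, Char.toNat, Char.ofNatAux, h]
    have hofNat : (Char.ofNat (c.toNat + 32)).toNat = c.toNat + 32 :=
      key _ (Or.inl (by omega))
    simp only [PySem.Chars.isspace]
    rw [hofNat]
    rw [Bool.eq_iff_iff]
    simp only [Bool.or_eq_true, Bool.and_eq_true, decide_eq_true_eq]
    omega
  · rfl

-- A's whole guard cascade on one word, as a shape test (length ≥ 4 and the stutter pattern)
def wordTest : List Char → Bool
  | a :: b :: c :: _ :: _ => (b == '-') && (PySem.Chars.lowerChar a == PySem.Chars.lowerChar c)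
  | _ => false

-- simple structural split-on-whitespace
def mySplit : List Char → List (List Char)
  | [] => []
  | c :: s =>
    if PySem.Chars.isspace c then mySplit s
    else (c :: s.takeWhile (fun x => !PySem.Chars.isspace x)) ::
         mySplit (s.dropWhile (fun x => !PySem.Chars.isspace x))
termination_by s => s.length
decreasing_by
  all_goals simp
  all_goals
    have := s.length_dropWhile_le (fun x => !PySem.Chars.isspace x)
    omega

theorem go_eq (s : List Char) : ∀ (cur : List Char) (acc : List (List Char)),
    PySem.Chars.split₀.go s cur acc =
      acc.reverse ++ (if cur = [] then mySplit s
        else (cur.reverse ++ s.takeWhile (fun x => !PySem.Chars.isspace x)) ::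
             mySplit (s.dropWhile (fun x => !PySem.Chars.isspace x))) := by
  induction s with
  | nil =>
    intro cur acc
    rcases cur with _ | ⟨c, cur⟩ <;> simp [PySem.Chars.split₀.go, mySplit]
  | cons c s ih =>
    intro cur acc
    by_cases hc : PySem.Chars.isspace c
    · rcases cur with _ | ⟨x, cur⟩ <;>
        simp [PySem.Chars.split₀.go, hc, ih, mySplit, List.takeWhile, List.dropWhile]
    · rcases cur with _ | ⟨x, cur⟩ <;>
        simp [PySem.Chars.split₀.go, hc, ih, mySplit, List.takeWhile, List.dropWhile]

theorem split₀_eq_mySplit (s : List Char) : PySem.Chars.split₀ s = mySplit s := by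
  simpa using go_eq s [] []

theorem loop_eq_any (ws : List (List Char)) :
    has_stuttering_loop ws = ws.any wordTest := by
  induction ws with
  | nil => rfl
  | cons w rest ih =>
    rcases w with _ | ⟨a, _ | ⟨b, _ | ⟨c, _ | ⟨d, t⟩⟩⟩⟩
    · simp [has_stuttering_loop, wordTest, ih]
    · simp [has_stuttering_loop, wordTest, ih]
    · simp [has_stuttering_loop, wordTest, ih]
    · simp [has_stuttering_loop, wordTest, ih]
    · by_cases hb : b = '-' <;>
        simp [has_stuttering_loop, wordTest, hb, ih, PySem.List.pyGet?, PySem.List.pyIdx?,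
          PySem.Chars.lower] <;>
      split_ifs <;>
      first
      | (simp_all <;> omega)
      | (by_cases hl : PySem.Chars.lowerChar a = PySem.Chars.lowerChar c <;> simp_all)

-- the sliding 4-character window (prev, first, '-', repeat) that B's index scan inspects
def win4 : List Char → Bool
  | p :: a :: b :: c :: rest =>
    (PySem.Chars.isspace p && (b == '-') && !PySem.Chars.isspace a
      && (PySem.Chars.lowerChar a == PySem.Chars.lowerChar c)) || win4 (a :: b :: c :: rest)
  | _ => false

def winCond (t : List Char) (i : Nat) : Bool :=
  (t.getD (i + 2) ' ' == '-')
  && PySem.Chars.isspace (t.getD i ' ')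
  && !PySem.Chars.isspace (t.getD (i + 1) ' ')
  && (PySem.Chars.lowerChar (t.getD (i + 1) ' ') == PySem.Chars.lowerChar (t.getD (i + 3) ' '))

theorem range_any_win4 : ∀ (t : List Char),
    (List.range (t.length - 3)).any (winCond t) = win4 t
  | [] => by simp [win4]
  | [_] => by simp [win4]
  | [_, _] => by simp [win4]
  | [_, _, _] => by simp [win4]
  | p :: a :: b :: c :: rest => by
    have hlen : (p :: a :: b :: c :: rest).length - 3 = rest.length + 1 := by simp
    rw [hlen, List.range_succ_eq_map]
    have hshift : ∀ i : Nat, winCond (p :: a :: b :: c :: rest) (i + 1)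
        = winCond (a :: b :: c :: rest) i := by
      intro i; simp [winCond]
    have h0 : winCond (p :: a :: b :: c :: rest) 0
        = (PySem.Chars.isspace p && (b == '-') && !PySem.Chars.isspace a
            && (PySem.Chars.lowerChar a == PySem.Chars.lowerChar c)) := by
      simp [winCond]
      by_cases h1 : b = '-' <;> by_cases h2 : PySem.Chars.isspace p <;>
        by_cases h3 : PySem.Chars.isspace a <;> simp [h1, h2, h3]
    have ih := range_any_win4 (a :: b :: c :: rest)
    have hlen2 : (a :: b :: c :: rest).length - 3 = rest.length := by simp
    rw [hlen2] at ih
    simp only [List.any_cons, List.any_map]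
    rw [h0]
    have htail : (List.range rest.length).any (fun i => winCond (p :: a :: b :: c :: rest) (Nat.succ i)) = win4 (a :: b :: c :: rest) := by
      rw [← ih]
      exact List.any_congr rfl (fun i => hshift i)
    conv_rhs => rw [win4]
    rw [← htail]
    rfl

theorem alt_eq_win4 (u : String) :
    has_stuttering_py_alt u = win4 (' ' :: u.toList) := by
  unfold has_stuttering_py_alt
  rw [← range_any_win4 (' ' :: u.toList)]
  have hlen : (' ' :: u.toList).length - 3 = u.toList.length - 2 := by simp
  rw [hlen]
  refine List.any_congr rfl ?_
  intro i
  cases i with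
  | zero =>
    have hsp : PySem.Chars.isspace ' ' = true := by decide
    simp [winCond, hsp]
  | succ j => simp [winCond]

theorem win4_nonspace (x : Char) (s : List Char) (hx : PySem.Chars.isspace x = false) :
    win4 (x :: s) = win4 s := by
  rcases s with _ | ⟨a, _ | ⟨b, _ | ⟨c, t⟩⟩⟩ <;> simp [win4, hx]

theorem win4_space_space (x y : Char) (s : List Char)
    (hx : PySem.Chars.isspace x = true) (hy : PySem.Chars.isspace y = true) :
    win4 (x :: s) = win4 (y :: s) := by
  rcases s with _ | ⟨a, _ | ⟨b, _ | ⟨c, t⟩⟩⟩ <;> simp [win4, hx, hy]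

theorem win4_space_snd (p x : Char) (s : List Char) (hx : PySem.Chars.isspace x = true) :
    win4 (p :: x :: s) = win4 (x :: s) := by
  rcases s with _ | ⟨a, _ | ⟨b, t⟩⟩ <;> simp [win4, hx]

theorem win4_dropWhile (s : List Char) :
    win4 s = win4 (s.dropWhile (fun x => !PySem.Chars.isspace x)) := by
  induction s with
  | nil => rfl
  | cons c s ih =>
    by_cases hc : PySem.Chars.isspace c
    · simp [List.dropWhile, hc]
    · rw [win4_nonspace c s (by simp [hc])]
      simp [List.dropWhile, hc, ih]

-- the lowercase of a non-whitespace character never equals a whitespace character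
theorem lower_ne_of_space (c e : Char) (hc : PySem.Chars.isspace c = false)
    (he : PySem.Chars.isspace e = true) :
    (PySem.Chars.lowerChar c == PySem.Chars.lowerChar e) = false := by
  by_contra h
  have heq : PySem.Chars.lowerChar c = PySem.Chars.lowerChar e := by
    cases hb : (PySem.Chars.lowerChar c == PySem.Chars.lowerChar e)
    · exact absurd hb h
    · exact beq_iff_eq.mp hb
  have := isspace_lowerChar c
  rw [heq, isspace_lowerChar e] at this
  rw [he] at this
  exact absurd this.symm (by rw [hc]; decide)

theorem stutterWord_cons (a b c : Char) (t : List Char) :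
    stutterWord (a :: b :: c :: t)
      = ((b == '-') && (PySem.Chars.lowerChar a == PySem.Chars.lowerChar c)) := by
  by_cases hbd : b = '-'
  · subst hbd; simp [stutterWord]
  · have hbne : (b == '-') = false := beq_eq_false_iff_ne.mpr hbd
    rw [hbne, Bool.false_and]
    rw [stutterWord.eq_def]
    split
    · next heq => simp at heq; exact absurd heq.2.1 hbd
    · rfl

theorem win4_head (c : Char) (s : List Char) (hc : PySem.Chars.isspace c = false) :
    win4 (' ' :: c :: s) =
      (stutterWord (c :: s.takeWhile (fun x => !PySem.Chars.isspace x)) || win4 (c :: s)) := by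
  have hsp : PySem.Chars.isspace ' ' = true := by decide
  rcases s with _ | ⟨b, _ | ⟨e, t⟩⟩
  · simp [win4, stutterWord]
  · by_cases hb : PySem.Chars.isspace b <;>
      simp [win4, stutterWord, List.takeWhile, hb]
  · by_cases hb : PySem.Chars.isspace b <;> by_cases he : PySem.Chars.isspace e
    · -- b space
      have hbne : (b == '-') = false := by
        cases h : (b == '-')
        · rfl
        · rw [beq_iff_eq.mp h] at hb; exact absurd hb (by decide)
      simp [win4, stutterWord, List.takeWhile, hb, hbne]
    · have hbne : (b == '-') = false := by
        cases h : (b == '-')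
        · rfl
        · rw [beq_iff_eq.mp h] at hb; exact absurd hb (by decide)
      simp [win4, stutterWord, List.takeWhile, hb, hbne]
    · -- b nonspace, e space: word is [c, b]; window's lower-compare fails
      have hle := lower_ne_of_space c e hc he
      simp [win4, stutterWord, List.takeWhile, hsp, hc, hb, he, hle]
    · -- b, e nonspace: word has ≥ 3 chars, window and stutterWord agree
      simp [win4, stutterWord_cons, List.takeWhile, hsp, hc, hb, he]

theorem dropWhile_head_space (s : List Char) (x : Char) (r : List Char)
    (h : s.dropWhile (fun x => !PySem.Chars.isspace x) = x :: r) :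
    PySem.Chars.isspace x = true := by
  have := List.head?_dropWhile_not (fun x => !PySem.Chars.isspace x) s
  rw [h] at this
  simpa using this

theorem main_eq (s : List Char) :
    (mySplit s).any stutterWord = win4 (' ' :: s) := by
  induction s using mySplit.induct with
  | case1 => simp [mySplit, win4]
  | case2 c s hc ih =>
    rw [mySplit, if_pos hc, ih, win4_space_snd ' ' c s hc,
      win4_space_space c ' ' s hc (by decide)]
  | case3 c s hc ih =>
    have hc' : PySem.Chars.isspace c = false := by simpa using hc
    have h2 : (mySplit (s.dropWhile (fun x => !PySem.Chars.isspace x))).any stutterWord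
        = win4 (c :: s) := by
      rw [ih, win4_nonspace c s hc', win4_dropWhile s]
      rcases hD : s.dropWhile (fun x => !PySem.Chars.isspace x) with _ | ⟨x, r⟩
      · simp [win4]
      · exact win4_space_snd ' ' x r (dropWhile_head_space s x r hD)
    rw [mySplit, if_neg hc, win4_head c s hc']
    simp only [List.any_cons, h2]

theorem wordTest_eq (w : List Char) :
    wordTest w = (stutterWord w && decide (4 ≤ w.length)) := by
  rcases w with _ | ⟨a, _ | ⟨b, _ | ⟨c, _ | ⟨d, t⟩⟩⟩⟩
  · simp [wordTest, stutterWord]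
  · simp [wordTest, stutterWord]
  · simp [wordTest, stutterWord]
  · simp [wordTest, stutterWord_cons]
  · simp [wordTest, stutterWord_cons]

theorem stutterWord_len (w : List Char) (h : stutterWord w = true) : 3 ≤ w.length := by
  rcases w with _ | ⟨a, _ | ⟨b, _ | ⟨c, t⟩⟩⟩ <;> simp_all [stutterWord]

theorem A_char (u : String) :
    has_stuttering_py u = (mySplit u.toList).any wordTest := by
  rw [has_stuttering_py, loop_eq_any, split₀_eq_mySplit]

theorem B_char (u : String) :
    has_stuttering_py_alt u = (mySplit u.toList).any stutterWord := by
  rw [alt_eq_win4, ← main_eq]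

theorem A_char' (u : String) :
    has_stuttering_py u
      = (mySplit u.toList).any (fun w => stutterWord w && decide (4 ≤ w.length)) := by
  rw [A_char]
  exact List.any_congr rfl wordTest_eq

-- ===== VERDICT =====
theorem has_stuttering_py_spec : Claim_unchanged_has_stuttering_py := by
  intro u _ hnD
  unfold D_has_stuttering_py at hnD
  rw [split₀_eq_mySplit] at hnD
  rw [A_char', B_char]
  by_cases h4 : (mySplit u.toList).any (fun w => stutterWord w && decide (4 ≤ w.length)) = true
  · rw [h4]
    obtain ⟨w, hw, hsw⟩ := List.any_eq_true.mp h4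
    exact (List.any_eq_true.mpr ⟨w, hw, Bool.and_elim_left hsw⟩).symm
  · have h4f := Bool.not_eq_true _ ▸ h4
    have h3f : (mySplit u.toList).any (fun w => stutterWord w && w.length == 3) = false := by
      cases h3 : (mySplit u.toList).any (fun w => stutterWord w && w.length == 3)
      · rfl
      · exact absurd ⟨h3, Bool.eq_false_iff.mpr (fun hh => h4 hh)⟩ hnD
    rw [Bool.eq_false_iff.mpr (fun hh => h4 hh)]
    symm
    rw [Bool.eq_false_iff]
    intro hB
    obtain ⟨w, hw, hsw⟩ := List.any_eq_true.mp hB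
    have hlen := stutterWord_len w hsw
    by_cases h4w : 4 ≤ w.length
    · exact h4 (List.any_eq_true.mpr ⟨w, hw, by simp [hsw, h4w]⟩)
    · have h3w : w.length = 3 := by omega
      have : (mySplit u.toList).any (fun w => stutterWord w && w.length == 3) = true :=
        List.any_eq_true.mpr ⟨w, hw, by simp [hsw, h3w]⟩
      rw [this] at h3f
      exact absurd h3f (by decide)

theorem has_stuttering_py_changed : Claim_changed_has_stuttering_py := by
  unfold Claim_changed_has_stuttering_py; decide

theorem has_stuttering_py_tight : Claim_exact_has_stuttering_py := by
  intro u _ hD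
  obtain ⟨h3, h4⟩ := hD
  rw [split₀_eq_mySplit] at h3 h4
  rw [A_char', B_char, h4]
  obtain ⟨w, hw, hsw⟩ := List.any_eq_true.mp h3
  rw [List.any_eq_true.mpr ⟨w, hw, Bool.and_elim_left hsw⟩]
  decide
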